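-- pv_equiv track=rewrite | github.com/jaypatel250510/Share-Secret | main.py | f
-- ===== SOURCE A (Python) =====
-- A = ('A', 'B', 'C', 'D', 'E', 'F', 'G', 'H', 'I', 'J', 'K', 'L', 'M', 'N', 'O', 'P', 'Q', 'R', 'S', 'T', 'U', 'V', 'W', 'X', 'Y'
--      , 'Z', '0', '1', '2', '3', '4', '5', '6', '7', '8', '9')
--
-- def f(x):
--   store = []
--   for s in x:
--     count = 0
--     for i in range(36):
--         if A[i].lower() == s.lower():
--           store.append(i)
--           count = 1
--           break
--     if count == 0:
--       store.append(' ')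
--   return tuple(store)
-- ===== SOURCE B (Python) =====
-- def f(x):
--   store = []
--   for s in x:
--     ls = s.lower()
--     if len(ls) == 1 and 'a' <= ls <= 'z':
--       store.append(ord(ls) - ord('a'))
--     elif len(ls) == 1 and '0' <= ls <= '9':
--       store.append(26 + ord(ls) - ord('0'))
--     else:
--       store.append(' ')
--   return tuple(store)
-- ===== Notes on version B (the rewrite author's own statement) =====
-- stated objective: faster
-- what changed: B drops the 36-entry table and the per-character linear scan, computing each index directly from the character code (ord arithmetic after lowercasing).
-- outside the precondition, e.g. on f(' '): A returns (' ',), B returns (' ',)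
import Mathlib
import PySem

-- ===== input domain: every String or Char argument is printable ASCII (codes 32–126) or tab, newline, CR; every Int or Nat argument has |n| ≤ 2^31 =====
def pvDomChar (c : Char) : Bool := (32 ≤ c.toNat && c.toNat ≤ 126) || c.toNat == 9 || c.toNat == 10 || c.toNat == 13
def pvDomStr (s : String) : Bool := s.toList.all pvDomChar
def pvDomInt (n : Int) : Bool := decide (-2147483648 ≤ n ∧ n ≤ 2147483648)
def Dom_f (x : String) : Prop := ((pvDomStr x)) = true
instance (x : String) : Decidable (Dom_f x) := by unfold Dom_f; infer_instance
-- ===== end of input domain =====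

-- B replaces A's per-character linear scan of the 36-entry table by direct ord arithmetic
-- on the lowercased character (idiomatic; equivalence proved on the Pre_ domain below).

-- ===== PORT A =====
-- the module-level tuple A of 36 one-character strings, as a list of chars
def tableA : List Char :=
  ['A','B','C','D','E','F','G','H','I','J','K','L','M','N','O','P','Q','R','S','T',
   'U','V','W','X','Y','Z','0','1','2','3','4','5','6','7','8','9']

-- the inner 'for i in range(36): … break' loop: first i with A[i].lower() == s.lower(), else none
def fScan (s : Char) : List Int → Option Int
  | [] => none
  | i :: rest =>
      if PySem.Chars.lowerChar (tableA.getD i.toNat ' ') = PySem.Chars.lowerChar s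
      then some i else fScan s rest

def f (x : String) : List Int :=
  x.toList.foldl
    (fun store s =>
      match fScan s (PySem.List.pyRange 0 36 1) with
      | some i => store ++ [i]
      | none => store ++ [])  -- Python appends ' ' (not an int) here; such inputs are outside Pre_f
    []

-- ===== PORT B =====
def f_alt (x : String) : List Int :=
  x.toList.foldl
    (fun store s =>
      let ls := PySem.Chars.lowerChar s
      if 'a' ≤ ls ∧ ls ≤ 'z' then store ++ [(ls.toNat : Int) - 97]
      else if '0' ≤ ls ∧ ls ≤ '9' then store ++ [26 + (ls.toNat : Int) - 48]
      else store ++ [])  -- Python appends ' ' (not an int) here; such inputs are outside Pre_f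
    []

-- ===== PRECONDITION & SPEC =====
-- Pre_ excludes inputs containing a non-alphanumeric character: there A appends the string ' '
-- to its result tuple, a value outside the declared return type List Int.
def Pre_f (x : String) : Prop := x.toList.all PySem.Chars.isalnum = true
instance (x : String) : Decidable (Pre_f x) := by unfold Pre_f; infer_instance

def pvWitness_f : String := "aZ07q"

def Spec_f (x : String) (out : List Int) : Prop := out = f_alt x
instance (x : String) (out : List Int) : Decidable (Spec_f x out) := by unfold Spec_f; infer_instance

-- ===== CLAIM (what is proved, stated in full; the proofs are below) =====
def Claim_equal_f : Prop := ∀ (x : String), Dom_f x → Pre_f x → Spec_f x (f x)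

-- ===== LEMMAS AND PROOFS =====

-- per-character equality of the two loop bodies, as flatMap pieces
def pvStepA (s : Char) : List Int :=
  match fScan s (PySem.List.pyRange 0 36 1) with
  | some i => [i]
  | none => []

def pvStepB (s : Char) : List Int :=
  let ls := PySem.Chars.lowerChar s
  if 'a' ≤ ls ∧ ls ≤ 'z' then [(ls.toNat : Int) - 97]
  else if '0' ≤ ls ∧ ls ≤ '9' then [26 + (ls.toNat : Int) - 48]
  else []

def pvCheck (n : Nat) : Bool :=
  let c := Char.ofNat n
  !(PySem.Chars.isalnum c) || (pvStepA c == pvStepB c)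

theorem pvCheck_all : (List.range 128).all pvCheck = true := by decide

theorem pvStep_eq (c : Char) (hd : pvDomChar c = true) (ha : PySem.Chars.isalnum c = true) :
    pvStepA c = pvStepB c := by
  have hlt : c.toNat < 128 := by
    simp [pvDomChar] at hd
    omega
  have := List.all_eq_true.mp pvCheck_all c.toNat (List.mem_range.mpr hlt)
  have hc : Char.ofNat c.toNat = c := Char.ofNat_toNat c
  simp only [pvCheck, hc, ha] at this
  simpa using this

-- ===== VERDICT (by name: the statement is the Claim_ definition above) =====
theorem f_spec : Claim_equal_f := by
  intro x hdom hpre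
  unfold Spec_f f f_alt
  have hA : ∀ (store : List Int) (s : Char),
      (match fScan s (PySem.List.pyRange 0 36 1) with
       | some i => store ++ [i]
       | none => store ++ []) = store ++ pvStepA s := by
    intro store s; unfold pvStepA; cases fScan s (PySem.List.pyRange 0 36 1) <;> simp
  have hB : ∀ (store : List Int) (s : Char),
      (let ls := PySem.Chars.lowerChar s;
       if 'a' ≤ ls ∧ ls ≤ 'z' then store ++ [(ls.toNat : Int) - 97]
       else if '0' ≤ ls ∧ ls ≤ '9' then store ++ [26 + (ls.toNat : Int) - 48]
       else store ++ []) = store ++ pvStepB s := by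
    intro store s; unfold pvStepB; dsimp only; split_ifs <;> simp
  simp only [hA, hB]
  rw [PySem.List.foldl_append_eq_flatMap, PySem.List.foldl_append_eq_flatMap]
  simp only [List.nil_append]
  apply List.flatMap_congr
  intro c hc
  have hd : pvDomChar c = true := by
    have := hdom; unfold Dom_f pvDomStr at this
    exact List.all_eq_true.mp this c hc
  have ha : PySem.Chars.isalnum c = true := by
    unfold Pre_f at hpre
    exact List.all_eq_true.mp hpre c hc
  exact pvStep_eq c hd ha
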